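-- pv_equiv track=rewrite | github.com/TheoDlmz/AxisRules | axis/bruteforce.py | minimal_swaps
-- ===== SOURCE A (Python) =====
-- def find_min(axis, ballots):
--     for i in range(len(axis)):
--         if ballots[axis[i]]:
--             return i
--     return -1
--
-- def find_max(axis, ballots):
--     for i in range(len(axis)):
--         if ballots[axis[len(axis)-1-i]]:
--             return len(axis)-1-i
--     return -1
--
-- def minimal_swaps(axis, ballots, current_min=None):
--     score = 0
--
--     for ball in ballots:
--         n = ball[-1]
--         app = ball[-2]
--         min_v = find_min(axis, ball[:-2])
--         max_v = find_max(axis, ball[:-2])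
--         count_before = 0
--         for i in range(min_v, max_v):
--             if not ball[axis[i]]:
--                 score += n*min(count_before, app-count_before)
--             else:
--                 count_before += 1
--
--         if current_min is not None and score > current_min:
--             return score, False
--     return score, True
-- ===== SOURCE B (Python) =====
-- def minimal_swaps(axis, ballots, current_min=None):
--     score = 0
--     for ball in ballots:
--         n = ball[-1]
--         app = ball[-2]
--         body = ball[:-2]
--         count_before = 0
--         pending = 0
--         started = False
--         for a in axis:
--             if body[a]:
--                 score += pending
--                 pending = 0
--                 started = True
--                 count_before += 1
--             elif started:
--                 pending += n * min(count_before, app - count_before)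
--         if current_min is not None and score > current_min:
--             return score, False
--     return score, True
-- ===== Notes on version B (the rewrite author's own statement) =====
-- stated objective: simpler
-- what changed: Replaces the three passes per ballot (find_min scan, find_max scan, then a range scan between them) with one single pass over axis that maintains a started flag, a running approved count and a pending accumulator committed only when a later approved candidate appears; no helper functions remain.
-- outside the precondition, e.g. on minimal_swaps([-2, -1, -2], [[1, 0, 2, 1]], None): A returns (0, True), B returns (1, True)
import Mathlib
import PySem

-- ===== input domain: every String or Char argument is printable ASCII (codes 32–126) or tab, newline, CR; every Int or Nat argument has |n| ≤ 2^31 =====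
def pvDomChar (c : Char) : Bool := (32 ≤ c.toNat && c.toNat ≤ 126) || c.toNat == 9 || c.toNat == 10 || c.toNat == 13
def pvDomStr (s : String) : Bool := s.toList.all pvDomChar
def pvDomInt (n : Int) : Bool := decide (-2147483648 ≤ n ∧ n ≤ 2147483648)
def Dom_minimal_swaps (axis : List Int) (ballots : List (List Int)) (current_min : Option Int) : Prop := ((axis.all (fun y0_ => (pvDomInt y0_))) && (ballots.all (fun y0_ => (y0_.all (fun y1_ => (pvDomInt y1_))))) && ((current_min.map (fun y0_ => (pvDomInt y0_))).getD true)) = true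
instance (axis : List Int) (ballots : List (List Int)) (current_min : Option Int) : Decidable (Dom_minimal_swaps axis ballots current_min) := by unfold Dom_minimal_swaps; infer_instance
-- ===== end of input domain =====

-- B replaces A's three scans of axis per ballot (find_min, find_max, then a scan between them)
-- by one single pass with a started flag and a pending accumulator; equal on Pre_ (valid axis indices).


-- ===== PORT A =====
-- find_min: for i in range(len(axis)): if ballots[axis[i]]: return i; return -1
def pyFindMinLoop (axis ballots : List Int) : List Nat → Int
  | [] => -1
  | i :: rest =>
    if PySem.List.pyGetD ballots (PySem.List.pyGetD axis (i : Int) 0) 0 ≠ 0 then (i : Int)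
    else pyFindMinLoop axis ballots rest

def pyFindMin (axis ballots : List Int) : Int := pyFindMinLoop axis ballots (List.range axis.length)

-- find_max: for i in range(len(axis)): if ballots[axis[len-1-i]]: return len-1-i; return -1
def pyFindMaxLoop (axis ballots : List Int) : List Nat → Int
  | [] => -1
  | i :: rest =>
    if PySem.List.pyGetD ballots (PySem.List.pyGetD axis ((axis.length : Int) - 1 - (i : Int)) 0) 0 ≠ 0
    then (axis.length : Int) - 1 - (i : Int)
    else pyFindMaxLoop axis ballots rest

def pyFindMax (axis ballots : List Int) : Int := pyFindMaxLoop axis ballots (List.range axis.length)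

def msLoopA (axis : List Int) (current_min : Option Int) : List (List Int) → Int → Int × Bool
  | [], score => (score, true)
  | ball :: rest, score =>
    let n := PySem.List.pyGetD ball (-1) 0
    let app := PySem.List.pyGetD ball (-2) 0
    let body := PySem.List.slice ball none (some (-2))
    let min_v := pyFindMin axis body
    let max_v := pyFindMax axis body
    let st := (PySem.List.pyRange min_v max_v 1).foldl
      (fun (p : Int × Int) i =>
        if PySem.List.pyGetD ball (PySem.List.pyGetD axis i 0) 0 = 0
        then (p.1 + n * min p.2 (app - p.2), p.2)
        else (p.1, p.2 + 1)) (score, 0)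
    match current_min with
    | some cm => if st.1 > cm then (st.1, false) else msLoopA axis current_min rest st.1
    | none => msLoopA axis current_min rest st.1

def minimal_swaps (axis : List Int) (ballots : List (List Int)) (current_min : Option Int) : Int × Bool :=
  msLoopA axis current_min ballots 0

-- ===== PORT B =====
def msLoopB (axis : List Int) (current_min : Option Int) : List (List Int) → Int → Int × Bool
  | [], score => (score, true)
  | ball :: rest, score =>
    let n := PySem.List.pyGetD ball (-1) 0
    let app := PySem.List.pyGetD ball (-2) 0
    let body := PySem.List.slice ball none (some (-2))
    -- state q = (score, count_before, pending, started)
    let st := axis.foldl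
      (fun (q : Int × Int × Int × Bool) a =>
        if PySem.List.pyGetD body a 0 ≠ 0 then (q.1 + q.2.2.1, q.2.1 + 1, 0, true)
        else if q.2.2.2 then (q.1, q.2.1, q.2.2.1 + n * min q.2.1 (app - q.2.1), q.2.2.2)
        else q) (score, 0, 0, false)
    match current_min with
    | some cm => if st.1 > cm then (st.1, false) else msLoopB axis current_min rest st.1
    | none => msLoopB axis current_min rest st.1

def minimal_swaps_alt (axis : List Int) (ballots : List (List Int)) (current_min : Option Int) : Int × Bool :=
  msLoopB axis current_min ballots 0

-- ===== PRECONDITION & SPEC =====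
-- Python A raises IndexError when a ballot has fewer than 2 entries (ball[-1]/ball[-2]) or when an
-- axis entry is ≥ len(ball)-2 (indexing ball[:-2] in find_min/find_max).  Pre_ also excludes NEGATIVE
-- axis entries, outside the natural domain (axis lists candidate positions): there A still returns,
-- but its value mixes wraparound indexing into ball[:-2] (find_min/find_max) with wraparound indexing
-- into the full ballot (the inner scan) — see the cited excluded example in the claim.
def Pre_minimal_swaps (axis : List Int) (ballots : List (List Int)) (current_min : Option Int) : Prop :=
  ∀ ball ∈ ballots, 2 ≤ ball.length ∧ ∀ a ∈ axis, 0 ≤ a ∧ a < (ball.length : Int) - 2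
instance (axis : List Int) (ballots : List (List Int)) (current_min : Option Int) : Decidable (Pre_minimal_swaps axis ballots current_min) := by unfold Pre_minimal_swaps; infer_instance

def pvWitness_minimal_swaps : List Int × List (List Int) × Option Int :=
  ([0, 1], [[1, 0, 1, 2], [0, 1, 1, 3]], none)

def Spec_minimal_swaps (axis : List Int) (ballots : List (List Int)) (current_min : Option Int) (out : Int × Bool) : Prop := out = minimal_swaps_alt axis ballots current_min
instance (axis : List Int) (ballots : List (List Int)) (current_min : Option Int) (out : Int × Bool) : Decidable (Spec_minimal_swaps axis ballots current_min out) := by unfold Spec_minimal_swaps; infer_instance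

-- ===== CLAIM (what is proved, stated in full; the proofs are below) =====
def Claim_equal_minimal_swaps : Prop := ∀ (axis : List Int) (ballots : List (List Int)) (current_min : Option Int), Dom_minimal_swaps axis ballots current_min → Pre_minimal_swaps axis ballots current_min → Spec_minimal_swaps axis ballots current_min (minimal_swaps axis ballots current_min)

-- ===== LEMMAS AND PROOFS =====

-- abstract (List Bool) versions of the two per-ballot computations
def pvW (n app cb : Int) : Int := n * min cb (app - cb)

def pvStepR (n app : Int) (bs : List Bool) (p : Int × Int) (i : Int) : Int × Int :=
  if bs.getD i.toNat false = false then (p.1 + pvW n app p.2, p.2) else (p.1, p.2 + 1)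

def pvStepB (n app : Int) (q : Int × Int × Int × Bool) (b : Bool) : Int × Int × Int × Bool :=
  if b then (q.1 + q.2.2.1, q.2.1 + 1, 0, true)
  else if q.2.2.2 then (q.1, q.2.1, q.2.2.1 + pvW n app q.2.1, q.2.2.2)
  else q

def pvFirstT : List Bool → Int
  | [] => -1
  | b :: t => if b then 0 else if pvFirstT t = -1 then -1 else pvFirstT t + 1

def pvLastT : List Bool → Int
  | [] => -1
  | b :: t => if pvLastT t = -1 then (if b then 0 else -1) else pvLastT t + 1

def pvH (n app : Int) : List Bool → Int → Bool → Int
  | [], _, _ => 0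
  | true :: t, cb, _ => pvH n app t (cb + 1) true
  | false :: t, cb, st => (if st ∧ t.any id then pvW n app cb else 0) + pvH n app t cb st

lemma pvFirstT_ge (bs : List Bool) : -1 ≤ pvFirstT bs := by
  induction bs with
  | nil => simp [pvFirstT]
  | cons b t ih => cases b <;> simp only [pvFirstT, if_true, if_false, Bool.false_eq_true] <;> (try split_ifs) <;> omega

lemma pvLastT_ge (bs : List Bool) : -1 ≤ pvLastT bs := by
  induction bs with
  | nil => simp [pvLastT]
  | cons b t ih => simp only [pvLastT]; split_ifs <;> omega

lemma pvFirstT_neg_iff (bs : List Bool) : pvFirstT bs = -1 ↔ bs.any id = false := by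
  induction bs with
  | nil => simp [pvFirstT]
  | cons b t ih =>
    cases b
    · have hge := pvFirstT_ge t
      cases h : t.any id with
      | false => simp [pvFirstT, ih.mpr h, h]
      | true =>
        have hne : pvFirstT t ≠ -1 := fun hc => by simp [ih.mp hc] at h
        simp only [pvFirstT, if_neg hne, List.any_cons, h, Bool.false_eq_true, if_false]
        constructor
        · intro hc; omega
        · intro hc; simp at hc
    · simp [pvFirstT]

lemma pvLastT_neg_iff (bs : List Bool) : pvLastT bs = -1 ↔ bs.any id = false := by
  induction bs with
  | nil => simp [pvLastT]
  | cons b t ih =>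
    have hge := pvLastT_ge t
    cases h : t.any id with
    | false =>
      cases b <;> simp [pvLastT, ih.mpr h, h]
    | true =>
      have hne : pvLastT t ≠ -1 := fun hc => by simp [ih.mp hc] at h
      simp only [pvLastT, if_neg hne, List.any_cons, h, Bool.or_true]
      constructor
      · intro hc; omega
      · intro hc; simp at hc

lemma pvFirstT_nonneg (bs : List Bool) (h : bs.any id = true) : 0 ≤ pvFirstT bs := by
  have h1 := pvFirstT_ge bs
  have h2 : pvFirstT bs ≠ -1 := fun hc => by simp [(pvFirstT_neg_iff bs).mp hc] at h
  omega

lemma pvLastT_lt_length (bs : List Bool) : pvLastT bs < (bs.length : Int) := by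
  induction bs with
  | nil => simp [pvLastT]
  | cons b t ih =>
    simp only [pvLastT, List.length_cons]
    split_ifs with h1 h2 <;> push_cast <;> omega

lemma pvLastT_append (bs : List Bool) (b : Bool) :
    pvLastT (bs ++ [b]) = if b then (bs.length : Int) else pvLastT bs := by
  induction bs with
  | nil => cases b <;> simp [pvLastT]
  | cons c t ih =>
    have hlt := pvLastT_lt_length t
    cases b <;> simp only [List.cons_append, pvLastT, ih, List.length_cons] <;>
      split_ifs with h1 h2 <;> push_cast at * <;> omega

lemma pvH_of_no_true (n app : Int) (bs : List Bool) (cb : Int) (st : Bool)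
    (h : bs.any id = false) : pvH n app bs cb st = 0 := by
  induction bs generalizing cb st with
  | nil => rfl
  | cons b t ih =>
    cases b
    · simp only [List.any_cons] at h
      simp [pvH, ih cb st (by simpa using h), (by simpa using h : t.any id = false)]
    · simp at h

lemma pyFindMinLoop_shift (ax body : List Int) (a : Int) (is : List Nat) :
    pyFindMinLoop (a :: ax) body (is.map Nat.succ) =
      if pyFindMinLoop ax body is = -1 then -1 else pyFindMinLoop ax body is + 1 := by
  induction is with
  | nil => simp [pyFindMinLoop]
  | cons i rest ih =>
    simp only [List.map_cons, pyFindMinLoop]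
    have hidx : PySem.List.pyGetD (a :: ax) ((i.succ : Nat) : Int) 0
        = PySem.List.pyGetD ax (i : Int) 0 := by
      simp only [Nat.succ_eq_add_one, PySem.List.pyGetD_natCast, List.getD_cons_succ]
    rw [hidx]
    by_cases h : PySem.List.pyGetD body (PySem.List.pyGetD ax (i : Int) 0) 0 ≠ 0
    · rw [if_pos h, if_pos h, if_neg (by omega)]
      push_cast; ring
    · rw [if_neg h, if_neg h, ih]

lemma pyFindMin_eq (axis body : List Int) :
    pyFindMin axis body =
      pvFirstT (axis.map fun a => decide (PySem.List.pyGetD body a 0 ≠ 0)) := by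
  induction axis with
  | nil => rfl
  | cons a ax ih =>
    show pyFindMinLoop (a :: ax) body (List.range (a :: ax).length) = _
    rw [List.length_cons, List.range_succ_eq_map]
    simp only [pyFindMinLoop, List.map_cons, pvFirstT]
    have hidx : PySem.List.pyGetD (a :: ax) ((0 : Nat) : Int) 0 = a := by
      simp [PySem.List.pyGetD_natCast]
    rw [hidx]
    by_cases h : PySem.List.pyGetD body a 0 ≠ 0
    · simp [h]
    · rw [if_neg h, pyFindMinLoop_shift,
        show pyFindMinLoop ax body (List.range ax.length) = pyFindMin ax body from rfl, ih]
      simp only [decide_eq_true_eq]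
      rw [if_neg h]

lemma pyFindMaxLoop_shift (ax body : List Int) (a : Int) (is : List Nat)
    (h : ∀ i ∈ is, i < ax.length) :
    pyFindMaxLoop (ax ++ [a]) body (is.map Nat.succ) = pyFindMaxLoop ax body is := by
  induction is with
  | nil => simp [pyFindMaxLoop]
  | cons i rest ih =>
    have hi : i < ax.length := h i (by simp)
    simp only [List.map_cons, pyFindMaxLoop, List.length_append, List.length_cons,
      List.length_nil]
    have e1 : ((ax.length + 1 : Nat) : Int) - 1 - ((i.succ : Nat) : Int)
        = ((ax.length - 1 - i : Nat) : Int) := by push_cast; omega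
    have e2 : ((ax.length : Nat) : Int) - 1 - ((i : Nat) : Int)
        = ((ax.length - 1 - i : Nat) : Int) := by push_cast; omega
    rw [e1, e2]
    have hidx : PySem.List.pyGetD (ax ++ [a]) ((ax.length - 1 - i : Nat) : Int) 0
        = PySem.List.pyGetD ax ((ax.length - 1 - i : Nat) : Int) 0 := by
      rw [PySem.List.pyGetD_natCast, PySem.List.pyGetD_natCast,
        List.getD_append _ _ _ _ (by omega)]
    rw [hidx]
    by_cases hc : PySem.List.pyGetD body (PySem.List.pyGetD ax ((ax.length - 1 - i : Nat) : Int) 0) 0 ≠ 0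
    · rw [if_pos hc, if_pos hc]
    · rw [if_neg hc, if_neg hc, ih (fun j hj => h j (by simp [hj]))]

lemma pyFindMax_eq (axis body : List Int) :
    pyFindMax axis body =
      pvLastT (axis.map fun a => decide (PySem.List.pyGetD body a 0 ≠ 0)) := by
  induction axis using List.reverseRecOn with
  | nil => rfl
  | append_singleton ax a ih =>
    show pyFindMaxLoop (ax ++ [a]) body (List.range (ax ++ [a]).length) = _
    rw [List.length_append, List.length_cons, List.length_nil, List.range_succ_eq_map]
    simp only [pyFindMaxLoop, List.length_append, List.length_cons, List.length_nil]
    have e0 : ((ax.length + 0 + 1 : Nat) : Int) - 1 - ((0 : Nat) : Int)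
        = ((ax.length : Nat) : Int) := by push_cast; omega
    rw [e0]
    have hidx : PySem.List.pyGetD (ax ++ [a]) ((ax.length : Nat) : Int) 0 = a := by
      rw [PySem.List.pyGetD_natCast, List.getD_append_right _ _ _ _ (le_refl _)]
      simp
    rw [hidx, List.map_append, List.map_singleton, pvLastT_append]
    by_cases h : PySem.List.pyGetD body a 0 ≠ 0
    · rw [if_pos h, if_pos (by simpa using h)]
      simp
    · rw [if_neg h, if_neg (by simpa using h), pyFindMaxLoop_shift ax body a _
        (fun j hj => List.mem_range.mp hj)]
      exact ih

lemma pvStepR_shift (n app : Int) (b : Bool) (bs : List Bool) (m M : Int) (hm : 0 ≤ m)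
    (p : Int × Int) :
    (PySem.List.pyRange (m + 1) (M + 1) 1).foldl (pvStepR n app (b :: bs)) p =
      (PySem.List.pyRange m M 1).foldl (pvStepR n app bs) p := by
  rw [PySem.List.pyRange_one (m + 1) (M + 1), PySem.List.pyRange_one m M]
  have e : (M + 1 - (m + 1)).toNat = (M - m).toNat := by omega
  rw [e, List.foldl_map, List.foldl_map]
  apply PySem.List.foldl_congr_mem
  intro acc k _
  unfold pvStepR
  have e2 : (m + 1 + (k : Int)).toNat = (m + (k : Int)).toNat + 1 := by omega
  rw [e2, List.getD_cons_succ]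

lemma pvG_eq (n app : Int) (bs : List Bool) (cb s : Int) :
    ((PySem.List.pyRange 0 (pvLastT bs) 1).foldl (pvStepR n app bs) (s, cb)).1 =
      s + pvH n app bs cb true := by
  induction bs generalizing cb s with
  | nil => simp [pvLastT, pvH, PySem.List.pyRange_one_eq_nil]
  | cons b t ih =>
    by_cases h : pvLastT t = -1
    · have hany : t.any id = false := (pvLastT_neg_iff t).mp h
      cases b
      · rw [show pvLastT (false :: t) = -1 from by simp [pvLastT, h]]
        rw [PySem.List.pyRange_one_eq_nil (by omega)]
        simp [pvH, hany, pvH_of_no_true n app t cb true hany]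
      · rw [show pvLastT (true :: t) = 0 from by simp [pvLastT, h]]
        rw [PySem.List.pyRange_one_eq_nil (by omega)]
        simp [pvH, pvH_of_no_true n app t (cb + 1) true hany]
    · have hge := pvLastT_ge t
      have hany : t.any id = true := by
        cases ht : t.any id
        · exact absurd ((pvLastT_neg_iff t).mpr ht) h
        · rfl
      have hL : pvLastT (b :: t) = pvLastT t + 1 := by simp [pvLastT, h]
      rw [hL, PySem.List.pyRange_one_cons (by omega), List.foldl_cons]
      cases b
      · have hstep : pvStepR n app (false :: t) (s, cb) 0 = (s + pvW n app cb, cb) := by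
          simp [pvStepR]
        rw [hstep, pvStepR_shift n app false t 0 (pvLastT t) (le_refl 0), ih]
        simp [pvH, hany]
        ring
      · have hstep : pvStepR n app (true :: t) (s, cb) 0 = (s, cb + 1) := by
          simp [pvStepR]
        rw [hstep, pvStepR_shift n app true t 0 (pvLastT t) (le_refl 0), ih]
        rfl

lemma pvA_eq (n app : Int) (bs : List Bool) (s : Int) :
    ((PySem.List.pyRange (pvFirstT bs) (pvLastT bs) 1).foldl (pvStepR n app bs) (s, 0)).1 =
      s + pvH n app bs 0 false := by
  induction bs generalizing s with
  | nil => simp [pvFirstT, pvLastT, pvH, PySem.List.pyRange_one_eq_nil]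
  | cons b t ih =>
    cases b
    · by_cases h : pvFirstT t = -1
      · have hany := (pvFirstT_neg_iff t).mp h
        have hF : pvFirstT (false :: t) = -1 := by simp [pvFirstT, h]
        have hL : pvLastT (false :: t) = -1 := by
          simp [pvLastT, (pvLastT_neg_iff t).mpr hany]
        rw [hF, hL, PySem.List.pyRange_one_eq_nil (by omega)]
        simp [pvH, hany, pvH_of_no_true n app t 0 false hany]
      · have hm := pvFirstT_ge t
        have hany : t.any id = true := by
          cases ht : t.any id
          · exact absurd ((pvFirstT_neg_iff t).mpr ht) h
          · rfl
        have hne : pvLastT t ≠ -1 := fun hc => by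
          rw [(pvLastT_neg_iff t).mp hc] at hany; exact Bool.false_ne_true hany
        have hF : pvFirstT (false :: t) = pvFirstT t + 1 := by simp [pvFirstT, h]
        have hL : pvLastT (false :: t) = pvLastT t + 1 := by simp [pvLastT, hne]
        rw [hF, hL, pvStepR_shift n app false t _ _ (by omega), ih]
        simp [pvH, hany]
    · have hF : pvFirstT (true :: t) = 0 := by simp [pvFirstT]
      rw [hF, pvG_eq]
      rfl

lemma pvB_eq (n app : Int) (bs : List Bool) (s cb p : Int) (st : Bool) :
    (bs.foldl (pvStepB n app) (s, cb, p, st)).1 =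
      s + (if bs.any id then p else 0) + pvH n app bs cb st := by
  induction bs generalizing s cb p st with
  | nil => simp [pvH]
  | cons b t ih =>
    cases b
    · cases st
      · have hstep : pvStepB n app (s, cb, p, false) false = (s, cb, p, false) := by
          simp [pvStepB]
        rw [List.foldl_cons, hstep, ih]
        cases hany : t.any id <;> simp [pvH, hany]
      · have hstep : pvStepB n app (s, cb, p, true) false = (s, cb, p + pvW n app cb, true) := by
          simp [pvStepB]
        rw [List.foldl_cons, hstep, ih]
        cases hany : t.any id <;> simp [pvH, hany] <;> ring
    · have hstep : pvStepB n app (s, cb, p, st) true = (s + p, cb + 1, 0, true) := by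
        simp [pvStepB]
      rw [List.foldl_cons, hstep, ih]
      cases hany : t.any id <;> simp [pvH, hany]

-- the per-ballot scores agree
lemma ballot_eq (axis ball : List Int) (s : Int)
    (hax : ∀ a ∈ axis, 0 ≤ a ∧ a < (ball.length : Int) - 2) :
    ((PySem.List.pyRange (pyFindMin axis (PySem.List.slice ball none (some (-2))))
        (pyFindMax axis (PySem.List.slice ball none (some (-2)))) 1).foldl
      (fun (p : Int × Int) i =>
        if PySem.List.pyGetD ball (PySem.List.pyGetD axis i 0) 0 = 0
        then (p.1 + PySem.List.pyGetD ball (-1) 0 * min p.2 (PySem.List.pyGetD ball (-2) 0 - p.2), p.2)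
        else (p.1, p.2 + 1)) (s, 0)).1 =
    (axis.foldl
      (fun (q : Int × Int × Int × Bool) a =>
        if PySem.List.pyGetD (PySem.List.slice ball none (some (-2))) a 0 ≠ 0
        then (q.1 + q.2.2.1, q.2.1 + 1, 0, true)
        else if q.2.2.2
        then (q.1, q.2.1, q.2.2.1 + PySem.List.pyGetD ball (-1) 0 * min q.2.1 (PySem.List.pyGetD ball (-2) 0 - q.2.1), q.2.2.2)
        else q) (s, 0, 0, false)).1 := by
  have hB : (axis.foldl
      (fun (q : Int × Int × Int × Bool) a =>
        if PySem.List.pyGetD (PySem.List.slice ball none (some (-2))) a 0 ≠ 0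
        then (q.1 + q.2.2.1, q.2.1 + 1, 0, true)
        else if q.2.2.2
        then (q.1, q.2.1, q.2.2.1 + PySem.List.pyGetD ball (-1) 0 * min q.2.1 (PySem.List.pyGetD ball (-2) 0 - q.2.1), q.2.2.2)
        else q) (s, 0, 0, false)) =
      ((axis.map fun a => decide (PySem.List.pyGetD (PySem.List.slice ball none (some (-2))) a 0 ≠ 0)).foldl
        (pvStepB (PySem.List.pyGetD ball (-1) 0) (PySem.List.pyGetD ball (-2) 0)) (s, 0, 0, false)) := by
    rw [List.foldl_map]
    apply PySem.List.foldl_congr_mem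
    intro acc a _
    by_cases h : PySem.List.pyGetD (PySem.List.slice ball none (some (-2))) a 0 ≠ 0 <;>
      simp [pvStepB, pvW, h]
  rw [hB, pyFindMin_eq, pyFindMax_eq,
    pvB_eq (PySem.List.pyGetD ball (-1) 0) (PySem.List.pyGetD ball (-2) 0) _ s 0 0 false]
  cases hany : (axis.map fun a => decide (PySem.List.pyGetD (PySem.List.slice ball none (some (-2))) a 0 ≠ 0)).any id with
  | false =>
    rw [(pvFirstT_neg_iff _).mpr hany, (pvLastT_neg_iff _).mpr hany,
      PySem.List.pyRange_one_eq_nil (by omega), pvH_of_no_true _ _ _ _ _ hany]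
    simp
  | true =>
    have hcong : (PySem.List.pyRange
        (pvFirstT (axis.map fun a => decide (PySem.List.pyGetD (PySem.List.slice ball none (some (-2))) a 0 ≠ 0)))
        (pvLastT (axis.map fun a => decide (PySem.List.pyGetD (PySem.List.slice ball none (some (-2))) a 0 ≠ 0))) 1).foldl
      (fun (p : Int × Int) i =>
        if PySem.List.pyGetD ball (PySem.List.pyGetD axis i 0) 0 = 0
        then (p.1 + PySem.List.pyGetD ball (-1) 0 * min p.2 (PySem.List.pyGetD ball (-2) 0 - p.2), p.2)
        else (p.1, p.2 + 1)) (s, 0) =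
      (PySem.List.pyRange
        (pvFirstT (axis.map fun a => decide (PySem.List.pyGetD (PySem.List.slice ball none (some (-2))) a 0 ≠ 0)))
        (pvLastT (axis.map fun a => decide (PySem.List.pyGetD (PySem.List.slice ball none (some (-2))) a 0 ≠ 0))) 1).foldl
      (pvStepR (PySem.List.pyGetD ball (-1) 0) (PySem.List.pyGetD ball (-2) 0)
        (axis.map fun a => decide (PySem.List.pyGetD (PySem.List.slice ball none (some (-2))) a 0 ≠ 0))) (s, 0) := by
      apply PySem.List.foldl_congr_mem
      intro acc i hi
      rw [PySem.List.mem_pyRange_one] at hi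
      have h0 : 0 ≤ i := le_trans (pvFirstT_nonneg _ hany) hi.1
      have hlen : i < (axis.length : Int) := by
        have := pvLastT_lt_length (axis.map fun a => decide (PySem.List.pyGetD (PySem.List.slice ball none (some (-2))) a 0 ≠ 0))
        rw [List.length_map] at this
        omega
      have hilt : i.toNat < axis.length := by omega
      have hgaxis : PySem.List.pyGetD axis i 0 = axis[i.toNat] :=
        PySem.List.pyGetD_eq_getElem axis 0 h0 (by simpa using hlen)
      have ha := hax axis[i.toNat] (List.getElem_mem hilt)
      have hbody : PySem.List.slice ball none (some (-2)) = ball.take (ball.length - 2) :=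
        PySem.List.slice_to_neg_ofNat ball 2 (by omega)
      have hblen : (PySem.List.slice ball none (some (-2))).length = ball.length - 2 := by
        rw [hbody, List.length_take]; omega
      have halt : axis[i.toNat].toNat < ball.length - 2 := by omega
      have hgball : PySem.List.pyGetD ball axis[i.toNat] 0 = ball[axis[i.toNat].toNat]'(by omega) :=
        PySem.List.pyGetD_eq_getElem ball 0 ha.1 (by push_cast; omega)
      have hgbody : PySem.List.pyGetD (PySem.List.slice ball none (some (-2))) axis[i.toNat] 0
          = ball[axis[i.toNat].toNat]'(by omega) := by
        rw [PySem.List.pyGetD_eq_getElem _ 0 ha.1 (by rw [hblen]; push_cast; omega)]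
        simp only [hbody]
        exact List.getElem_take
      have hbs : (axis.map fun a => decide (PySem.List.pyGetD (PySem.List.slice ball none (some (-2))) a 0 ≠ 0)).getD i.toNat false
          = decide (ball[axis[i.toNat].toNat]'(by omega) ≠ 0) := by
        rw [List.getD_eq_getElem _ _ (by simpa using hilt), List.getElem_map, hgbody]
      unfold pvStepR
      rw [hgaxis, hgball, hbs]
      by_cases hz : ball[axis[i.toNat].toNat]'(by omega) = 0 <;> simp [hz, pvW]
    rw [hcong, pvA_eq]
    simp


lemma msLoop_eq (axis : List Int) (cm : Option Int) (ballots : List (List Int)) (s : Int)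
    (h : ∀ ball ∈ ballots, 2 ≤ ball.length ∧ ∀ a ∈ axis, 0 ≤ a ∧ a < (ball.length : Int) - 2) :
    msLoopA axis cm ballots s = msLoopB axis cm ballots s := by
  induction ballots generalizing s with
  | nil => rfl
  | cons ball rest ih =>
    have hball := h ball (by simp)
    have hrest : ∀ b ∈ rest, 2 ≤ b.length ∧ ∀ a ∈ axis, 0 ≤ a ∧ a < (b.length : Int) - 2 :=
      fun b hb => h b (by simp [hb])
    have key := ballot_eq axis ball s hball.2
    simp only [msLoopA, msLoopB]
    rw [key]
    cases cm with
    | none => exact ih _ hrest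
    | some c =>
      dsimp only
      split_ifs with hc
      · rfl
      · exact ih _ hrest

-- ===== VERDICT (by name: the statement is the Claim_ definition above) =====
theorem minimal_swaps_spec : Claim_equal_minimal_swaps := by
  intro axis ballots cm _ hpre
  unfold Spec_minimal_swaps minimal_swaps minimal_swaps_alt
  exact msLoop_eq axis cm ballots 0 hpre
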